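-- pv_equiv track=rewrite | github.com/isaac9031/LeetCode-Practice | galvanize/remove_element.py | remove_second_small
-- ===== SOURCE A (Python) =====
-- def remove_second_small(lista):
--     #a variable to have the min value
--     #another one for the second smallest
--     #a for loop to compare against previous values
--     #remove the second smallest
--     minimum = min(lista)
--     sec_min = float("inf") #still unknown
--     for n in lista:
--       if n<sec_min and n != minimum:
--          sec_min = n
--     lista.remove(sec_min)
--     return lista
-- ===== SOURCE B (Python) =====
-- def remove_second_small(lista):
--     distinct = sorted(set(lista))
--     lista.remove(distinct[1])
--     return lista
-- ===== Notes on version B (the rewrite author's own statement) =====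
-- stated objective: simpler
-- what changed: replaces the min() scan plus a sentinel-tracking second-minimum loop with sorted(set(lista)) and indexing its second element
import Mathlib
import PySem

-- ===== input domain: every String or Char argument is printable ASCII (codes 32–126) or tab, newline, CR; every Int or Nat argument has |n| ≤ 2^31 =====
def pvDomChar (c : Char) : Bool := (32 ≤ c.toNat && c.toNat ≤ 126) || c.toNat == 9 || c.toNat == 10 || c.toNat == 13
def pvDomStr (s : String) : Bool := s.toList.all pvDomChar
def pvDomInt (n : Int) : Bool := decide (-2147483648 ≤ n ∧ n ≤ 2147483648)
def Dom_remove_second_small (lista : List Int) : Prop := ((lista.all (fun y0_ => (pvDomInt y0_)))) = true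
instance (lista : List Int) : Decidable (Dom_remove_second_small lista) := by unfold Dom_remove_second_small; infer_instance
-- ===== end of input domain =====

-- B replaces A's min()+sentinel second-minimum scan with sorted(set(lista)) indexed at 1 (simpler);
-- both Pythons mutate lista in place via .remove; equivalence here is about the returned value.


-- ===== PORT A =====
-- A's loop body: 'if n < sec_min and n != minimum: sec_min = n', with none = float('inf')
def secStep (minimum : Int) (acc : Option Int) (n : Int) : Option Int :=
  if (match acc with | none => true | some m => decide (n < m)) && n ≠ minimum then some n else acc

def remove_second_small (lista : List Int) : List Int :=
  match PySem.List.min? lista (fun x => x) with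
  | none => lista            -- min([]) raises ValueError: outside Pre_
  | some minimum =>
    match lista.foldl (secStep minimum) none with
    | none => lista          -- lista.remove(inf) raises ValueError: outside Pre_
    | some sec_min => (PySem.List.remove? lista sec_min).getD lista

-- ===== PORT B =====
def remove_second_small_alt (lista : List Int) : List Int :=
  let distinct := PySem.List.sorted (PySem.Set.ofList lista) (fun x => x) false
  match PySem.List.pyGet? distinct 1 with
  | none => lista            -- distinct[1] raises IndexError: outside Pre_
  | some v => (PySem.List.remove? lista v).getD lista

-- ===== PRECONDITION & SPEC =====
-- Pre_ excludes exactly the inputs on which A raises ValueError (empty list, or all elements equal):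
-- A returns iff lista has at least two distinct values.
def Pre_remove_second_small (lista : List Int) : Prop :=
  2 ≤ (PySem.Set.ofList lista).length
instance (lista : List Int) : Decidable (Pre_remove_second_small lista) := by
  unfold Pre_remove_second_small; infer_instance

def pvWitness_remove_second_small : List Int := [3, 1, 2]

def Spec_remove_second_small (lista : List Int) (out : List Int) : Prop := out = remove_second_small_alt lista
instance (lista : List Int) (out : List Int) : Decidable (Spec_remove_second_small lista out) := by unfold Spec_remove_second_small; infer_instance

-- ===== CLAIM (what is proved, stated in full; the proofs are below) =====
def Claim_equal_remove_second_small : Prop := ∀ (lista : List Int), Dom_remove_second_small lista → Pre_remove_second_small lista → Spec_remove_second_small lista (remove_second_small lista)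

-- ===== LEMMAS AND PROOFS =====

-- one step of A's loop: either it updates (strict improvement, n ≠ minimum) or it keeps acc
lemma secStep_cases (m : Int) (acc : Option Int) (n : Int) :
    (secStep m acc n = some n ∧ n ≠ m ∧ (∀ a, acc = some a → n < a)) ∨
    (secStep m acc n = acc ∧ (n = m ∨ ∃ a, acc = some a ∧ a ≤ n)) := by
  unfold secStep
  split_ifs with hc
  · simp only [Bool.and_eq_true, decide_eq_true_eq] at hc
    refine Or.inl ⟨rfl, hc.2, ?_⟩
    intro a ha
    cases acc with
    | none => cases ha
    | some a' => cases ha; simpa using hc.1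
  · refine Or.inr ⟨rfl, ?_⟩
    cases acc with
    | none =>
      by_cases hnm : n = m
      · exact Or.inl hnm
      · exact absurd (by simp [hnm]) hc
    | some a =>
      by_cases hnm : n = m
      · exact Or.inl hnm
      · refine Or.inr ⟨a, rfl, ?_⟩
        by_contra hlt
        exact hc (by simp [hnm]; omega)

-- the fold's result, if some v, has v ∈ l and v ≠ m (or was already the accumulator)
lemma foldA_mem (m : Int) (l : List Int) : ∀ (acc : Option Int) (v : Int),
    l.foldl (secStep m) acc = some v → acc = some v ∨ (v ∈ l ∧ v ≠ m) := by
  induction l with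
  | nil => intro acc v h; exact Or.inl h
  | cons x t ih =>
    intro acc v h
    simp only [List.foldl_cons] at h
    rcases secStep_cases m acc x with ⟨heq, hxm, _⟩ | ⟨heq, _⟩ <;> rw [heq] at h
    · rcases ih _ _ h with h' | h'
      · obtain rfl := Option.some_inj.mp h'
        exact Or.inr ⟨List.mem_cons_self, hxm⟩
      · exact Or.inr ⟨List.mem_cons_of_mem _ h'.1, h'.2⟩
    · rcases ih _ _ h with h' | h'
      · exact Or.inl h'
      · exact Or.inr ⟨List.mem_cons_of_mem _ h'.1, h'.2⟩

-- once the accumulator is some, the fold stays some, with value ≤ the accumulator's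
lemma foldA_le_acc (m : Int) (l : List Int) : ∀ (a : Int),
    ∃ v, l.foldl (secStep m) (some a) = some v ∧ v ≤ a := by
  induction l with
  | nil => intro a; exact ⟨a, rfl, le_refl a⟩
  | cons x t ih =>
    intro a
    simp only [List.foldl_cons]
    rcases secStep_cases m (some a) x with ⟨heq, _, hlt⟩ | ⟨heq, _⟩ <;> rw [heq]
    · obtain ⟨v, hv, hle⟩ := ih x
      exact ⟨v, hv, le_trans hle (le_of_lt (hlt a rfl))⟩
    · exact ih a

-- the fold's result is a lower bound on the elements of l that are ≠ m
lemma foldA_isMin (m : Int) (l : List Int) : ∀ (acc : Option Int) (v : Int),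
    l.foldl (secStep m) acc = some v → ∀ y ∈ l, y ≠ m → v ≤ y := by
  induction l with
  | nil => intro _ _ _ y hy; exact absurd hy List.not_mem_nil
  | cons x t ih =>
    intro acc v h y hy hym
    simp only [List.foldl_cons] at h
    rcases List.mem_cons.mp hy with rfl | hy'
    · rcases secStep_cases m acc y with ⟨heq, _, _⟩ | ⟨heq, hrest⟩ <;> rw [heq] at h
      · obtain ⟨w, hw, hle⟩ := foldA_le_acc m t y
        rw [h] at hw
        exact (Option.some_inj.mp hw) ▸ hle
      · rcases hrest with hym' | ⟨a, rfl, hay⟩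
        · exact absurd hym' hym
        · obtain ⟨w, hw, hle⟩ := foldA_le_acc m t a
          rw [h] at hw
          exact le_trans ((Option.some_inj.mp hw) ▸ hle) hay
    · rcases secStep_cases m acc x with ⟨heq, _, _⟩ | ⟨heq, _⟩ <;> rw [heq] at h <;>
        exact ih _ _ h y hy' hym

-- if some element ≠ m exists, the fold result is not none
lemma foldA_ne_none (m : Int) (l : List Int) :
    (∃ y ∈ l, y ≠ m) → l.foldl (secStep m) (none : Option Int) ≠ none := by
  induction l with
  | nil => rintro ⟨y, hy, -⟩; exact absurd hy List.not_mem_nil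
  | cons x t ih =>
    rintro ⟨y, hy, hym⟩
    simp only [List.foldl_cons]
    rcases secStep_cases m (none : Option Int) x with ⟨heq, _, _⟩ | ⟨heq, hrest⟩ <;> rw [heq]
    · obtain ⟨w, hw, _⟩ := foldA_le_acc m t x
      simp [hw]
    · have hxm : x = m := by
        rcases hrest with h' | ⟨a, ha, _⟩
        · exact h'
        · cases ha
      rcases List.mem_cons.mp hy with rfl | hy'
      · exact absurd hxm hym
      · exact ih ⟨y, hy', hym⟩

-- ===== VERDICT (by name: the statement is the Claim_ definition above) =====
theorem remove_second_small_spec : Claim_equal_remove_second_small := by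
  intro lista _ hpre
  unfold Pre_remove_second_small at hpre
  unfold Spec_remove_second_small
  set s := PySem.List.sorted (PySem.Set.ofList lista) (fun x => x) false with hs
  clear_value s
  have hperm : s.Perm (PySem.Set.ofList lista) := by rw [hs]; exact PySem.List.sorted_perm _ _ _
  have hpw : s.Pairwise (· < ·) := by rw [hs]; exact PySem.List.sorted_ofList_pairwise_lt lista
  have hlen : 2 ≤ s.length := by rw [hperm.length_eq]; exact hpre
  obtain ⟨a, b, t, hst⟩ : ∃ a b t, s = a :: b :: t := by
    cases s with
    | nil => simp at hlen
    | cons a s' => cases s' with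
      | nil => simp at hlen
      | cons b t => exact ⟨a, b, t, rfl⟩
  have hmemS : ∀ x, x ∈ s ↔ x ∈ lista := by
    intro x; rw [hperm.mem_iff, PySem.Set.mem_ofList]
  have hne : lista ≠ [] := by
    intro hnil
    have := hmemS a; rw [hst, hnil] at this; simp at this
  obtain ⟨m, hm⟩ : ∃ m, PySem.List.min? lista (fun x => x) = some m := by
    cases hmin : PySem.List.min? lista (fun x => x) with
    | none => exact absurd ((PySem.List.min?_eq_none_iff _ _).mp hmin) hne
    | some m => exact ⟨m, rfl⟩
  have hmmem : m ∈ lista := PySem.List.min?_mem hm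
  have hmmin : ∀ y ∈ lista, m ≤ y := by
    intro y hy; simpa using PySem.List.min?_isMin hm y hy
  have hamem : a ∈ lista := (hmemS a).mp (by simp [hst])
  have ham : a = m := by
    have h1 : ∀ y ∈ PySem.Set.ofList lista, a ≤ y := by
      intro y hy
      simpa using PySem.List.key_head_sorted_le (PySem.Set.ofList lista) (fun x => x) (by rw [← hs, hst]) y hy
    exact le_antisymm (h1 m ((PySem.Set.mem_ofList _ _).mpr hmmem)) (hmmin a hamem)
  have hab : a < b := (List.pairwise_cons.mp (hst ▸ hpw)).1 b (by simp)
  have hbmem : b ∈ lista := (hmemS b).mp (by simp [hst])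
  have hbm : b ≠ m := by omega
  obtain ⟨v, hv⟩ : ∃ v, lista.foldl (secStep m) none = some v := by
    cases hfold : lista.foldl (secStep m) none with
    | none => exact absurd hfold (foldA_ne_none m lista ⟨b, hbmem, hbm⟩)
    | some v => exact ⟨v, rfl⟩
  obtain ⟨hvmem, hvm⟩ : v ∈ lista ∧ v ≠ m := by
    rcases foldA_mem m lista none v hv with h | h
    · cases h
    · exact h
  have hvb : v = b := by
    have h1 : v ≤ b := foldA_isMin m lista none v hv b hbmem hbm
    have h2 : b ≤ v := by
      have hvs : v ∈ s := (hmemS v).mpr hvmem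
      rw [hst] at hvs
      rcases List.mem_cons.mp hvs with rfl | hvs'
      · exact absurd ham hvm
      rcases List.mem_cons.mp hvs' with rfl | hvt
      · exact le_refl v
      · exact le_of_lt ((List.pairwise_cons.mp ((List.pairwise_cons.mp (hst ▸ hpw)).2)).1 v hvt)
    omega
  subst hvb
  have hget : PySem.List.pyGet? s 1 = some v := by
    rw [hst]; simp [PySem.List.pyGet?, PySem.List.pyIdx?]
  have hA : remove_second_small lista = (PySem.List.remove? lista v).getD lista := by
    unfold remove_second_small
    simp only [hm, hv]
  have hB : remove_second_small_alt lista = (PySem.List.remove? lista v).getD lista := by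
    unfold remove_second_small_alt
    simp only [← hs, hget]
  rw [hA, hB]
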